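-- pv_equiv track=rewrite | github.com/TTK8888/StartupAssignment | funding_dataset/scraper/entities.py | _looks_like_prose
-- ===== SOURCE A (Python) =====
-- def _looks_like_prose(value: str) -> bool:
--     # rejects sentence fragments that were captured as entity lists
--     lowered = f" {value.lower()} "
--     prose_markers = [
--         " is ", " was ", " are ", " were ", " has ", " have ",
--         " will ", " would ", " should ", " can ", " may ", " might ",
--         " which ", " that ", " help ", " helps ", " expand ",
--         " catalyze ", " scale ", " grow ", " their ", " its ", " on ",
--     ]
--     if any(marker in lowered for marker in prose_markers):
--         return True
--     return False
-- ===== SOURCE B (Python) =====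
-- _MARKER_WORDS = {
--     "is", "was", "are", "were", "has", "have",
--     "will", "would", "should", "can", "may", "might",
--     "which", "that", "help", "helps", "expand",
--     "catalyze", "scale", "grow", "their", "its", "on",
-- }
--
--
-- def _looks_like_prose(value: str) -> bool:
--     # tokenize once on single spaces; a padded-marker substring hit is exactly
--     # a space-delimited token equal to a bare marker word
--     return any(word in _MARKER_WORDS for word in value.lower().split(" "))
-- ===== Notes on version B (the rewrite author's own statement) =====
-- stated objective: idiomatic
-- what changed: B replaces A's 23 per-marker substring scans over the padded lowered string by one single-space tokenization of the lowered string plus a set-membership test per token (a padded-marker substring hit is exactly a space-delimited token equal to a bare marker word).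
import Mathlib
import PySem

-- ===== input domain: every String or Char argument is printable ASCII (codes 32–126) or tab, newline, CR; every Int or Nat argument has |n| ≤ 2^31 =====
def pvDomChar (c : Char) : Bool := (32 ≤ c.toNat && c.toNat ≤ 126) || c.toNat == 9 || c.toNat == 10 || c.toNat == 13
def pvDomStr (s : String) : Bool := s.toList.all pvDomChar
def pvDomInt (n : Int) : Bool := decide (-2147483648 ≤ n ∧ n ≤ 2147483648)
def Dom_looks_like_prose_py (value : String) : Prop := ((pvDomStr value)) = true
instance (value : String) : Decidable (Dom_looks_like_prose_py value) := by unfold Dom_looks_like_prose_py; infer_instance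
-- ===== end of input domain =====

-- B tokenizes once on single spaces and tests each token against a set of bare
-- marker words, instead of A's per-marker substring scan over the padded string.

-- ===== PORT A =====
-- f" {value.lower()} " is built on code points (Lean's own String.append is kernel-opaque).
def looks_like_prose_py (value : String) : Bool :=
  let lowered : List Char := ' ' :: (PySem.Chars.lower value.toList ++ [' '])
  let prose_markers : List (List Char) :=
    [[' ', 'i', 's', ' '],
     [' ', 'w', 'a', 's', ' '],
     [' ', 'a', 'r', 'e', ' '],
     [' ', 'w', 'e', 'r', 'e', ' '],
     [' ', 'h', 'a', 's', ' '],
     [' ', 'h', 'a', 'v', 'e', ' '],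
     [' ', 'w', 'i', 'l', 'l', ' '],
     [' ', 'w', 'o', 'u', 'l', 'd', ' '],
     [' ', 's', 'h', 'o', 'u', 'l', 'd', ' '],
     [' ', 'c', 'a', 'n', ' '],
     [' ', 'm', 'a', 'y', ' '],
     [' ', 'm', 'i', 'g', 'h', 't', ' '],
     [' ', 'w', 'h', 'i', 'c', 'h', ' '],
     [' ', 't', 'h', 'a', 't', ' '],
     [' ', 'h', 'e', 'l', 'p', ' '],
     [' ', 'h', 'e', 'l', 'p', 's', ' '],
     [' ', 'e', 'x', 'p', 'a', 'n', 'd', ' '],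
     [' ', 'c', 'a', 't', 'a', 'l', 'y', 'z', 'e', ' '],
     [' ', 's', 'c', 'a', 'l', 'e', ' '],
     [' ', 'g', 'r', 'o', 'w', ' '],
     [' ', 't', 'h', 'e', 'i', 'r', ' '],
     [' ', 'i', 't', 's', ' '],
     [' ', 'o', 'n', ' ']]
  prose_markers.any (fun marker => PySem.Chars.isIn marker lowered)

-- ===== PORT B =====
def pvMarkerWordList : List (List Char) :=
  [['i', 's'],
   ['w', 'a', 's'],
   ['a', 'r', 'e'],
   ['w', 'e', 'r', 'e'],
   ['h', 'a', 's'],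
   ['h', 'a', 'v', 'e'],
   ['w', 'i', 'l', 'l'],
   ['w', 'o', 'u', 'l', 'd'],
   ['s', 'h', 'o', 'u', 'l', 'd'],
   ['c', 'a', 'n'],
   ['m', 'a', 'y'],
   ['m', 'i', 'g', 'h', 't'],
   ['w', 'h', 'i', 'c', 'h'],
   ['t', 'h', 'a', 't'],
   ['h', 'e', 'l', 'p'],
   ['h', 'e', 'l', 'p', 's'],
   ['e', 'x', 'p', 'a', 'n', 'd'],
   ['c', 'a', 't', 'a', 'l', 'y', 'z', 'e'],
   ['s', 'c', 'a', 'l', 'e'],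
   ['g', 'r', 'o', 'w'],
   ['t', 'h', 'e', 'i', 'r'],
   ['i', 't', 's'],
   ['o', 'n']]

def pvMarkerWords : PySem.Set (List Char) := PySem.Set.ofList pvMarkerWordList

def looks_like_prose_py_alt (value : String) : Bool :=
  ((PySem.Chars.split? (PySem.Chars.lower value.toList) [' ']).getD []).any
    (fun word => pvMarkerWords.contains word)

-- ===== PRECONDITION & SPEC =====
def Spec_looks_like_prose_py (value : String) (out : Bool) : Prop := out = looks_like_prose_py_alt value
instance (value : String) (out : Bool) : Decidable (Spec_looks_like_prose_py value out) := by unfold Spec_looks_like_prose_py; infer_instance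

-- ===== CLAIM (what is proved, stated in full; the proofs are below) =====
def Claim_equal_looks_like_prose_py : Prop := ∀ (value : String), Dom_looks_like_prose_py value → Spec_looks_like_prose_py value (looks_like_prose_py value)

-- ===== LEMMAS AND PROOFS =====

-- PySem's fueled single-space splitter is Mathlib's `List.splitOnP (· == ' ')`.
theorem pv_go_eq (l : List Char) : ∀ (fuel : Nat) (cur : List Char) (acc : List (List Char)), l.length ≤ fuel →
    PySem.Chars.splitOn.go [' '] fuel l cur acc
      = acc.reverse ++ List.splitOnP.go (fun c => c == ' ') l cur := by
  induction l with
  | nil =>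
    intro fuel cur acc _
    cases fuel <;> simp [PySem.Chars.splitOn.go, List.splitOnP.go]
  | cons c rest ih =>
    intro fuel cur acc h
    cases fuel with
    | zero => simp at h
    | succ fuel =>
      by_cases hc : c = ' '
      · subst hc
        rw [show PySem.Chars.splitOn.go [' '] (fuel + 1) (' ' :: rest) cur acc
              = PySem.Chars.splitOn.go [' '] fuel rest [] (cur.reverse :: acc) by
            simp [PySem.Chars.splitOn.go, List.isPrefixOf]]
        rw [ih fuel [] (cur.reverse :: acc) (by simpa using h)]
        simp [List.splitOnP.go]
      · rw [show PySem.Chars.splitOn.go [' '] (fuel + 1) (c :: rest) cur acc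
              = PySem.Chars.splitOn.go [' '] fuel rest (c :: cur) acc by
            simp [PySem.Chars.splitOn.go, List.isPrefixOf, Ne.symm hc]]
        rw [ih fuel (c :: cur) acc (by simpa using h)]
        simp [List.splitOnP.go, hc]

theorem pv_splitOn_single (cs : List Char) :
    PySem.Chars.splitOn cs [' '] = List.splitOn ' ' cs := by
  unfold PySem.Chars.splitOn List.splitOn List.splitOnP
  rw [pv_go_eq cs (cs.length + 1) [] [] (by omega)]
  simp

-- every token of the token list occurs, surrounded by spaces, in the padded intercalation
theorem pv_mem_intercalate_infix (w : List Char) (parts : List (List Char)) (hw : w ∈ parts) :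
    (' ' :: (w ++ [' '])) <:+: (' ' :: ([' '].intercalate parts ++ [' '])) := by
  induction parts with
  | nil => cases hw
  | cons p ps ih =>
    rcases List.mem_cons.mp hw with rfl | hw'
    · cases ps with
      | nil =>
        simp [List.intercalate, List.intersperse]
      | cons q qs =>
        have h0 : [' '].intercalate (w :: q :: qs) = w ++ ' ' :: [' '].intercalate (q :: qs) := by
          simp [List.intercalate, List.intersperse]
        rw [h0]
        refine List.IsPrefix.isInfix ⟨[' '].intercalate (q :: qs) ++ [' '], ?_⟩
        simp
    · cases ps with
      | nil => cases hw'
      | cons q qs =>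
        have h1 : (' ' :: (w ++ [' '])) <:+: (' ' :: ([' '].intercalate (q :: qs) ++ [' '])) :=
          ih hw'
        have h2 : (' ' :: ([' '].intercalate (q :: qs) ++ [' ']))
            <:+ (' ' :: ([' '].intercalate (p :: q :: qs) ++ [' '])) := by
          refine ⟨' ' :: p, ?_⟩
          simp [List.intercalate, List.intersperse]
        exact h1.trans h2.isInfix

-- a padded occurrence forces a whole space-delimited token
theorem pv_infix_mem_splitOn (w cs : List Char) (hw : ∀ c ∈ w, ¬((fun c : Char => c == ' ') c = true))
    (h : (' ' :: (w ++ [' '])) <:+: (' ' :: (cs ++ [' ']))) : w ∈ cs.splitOn ' ' := by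
  have hsep : (fun c : Char => c == ' ') ' ' = true := by simp
  obtain ⟨l, r, hlr⟩ := h
  unfold List.splitOn
  cases l with
  | nil =>
    simp only [List.nil_append, List.cons_append, List.cons.injEq] at hlr
    obtain ⟨-, hlr⟩ := hlr
    rcases List.eq_nil_or_concat r with rfl | ⟨r', x, rfl⟩
    · have hcs : w = cs := by
        have h1 := hlr
        simp only [List.append_nil] at h1
        have h2 : w ++ [' '] = cs ++ [' '] := by simpa [List.append_assoc] using h1
        exact List.append_cancel_right h2
      subst hcs
      rw [List.splitOnP_eq_single _ _ hw]
      simp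
    · have h2 : (w ++ ' ' :: r') ++ [x] = cs ++ [' '] := by
        simpa [List.append_assoc] using hlr
      obtain ⟨h3, -⟩ := List.append_inj' h2 rfl
      rw [← h3, List.splitOnP_first _ _ hw ' ' hsep r']
      simp
  | cons c l' =>
    simp only [List.cons_append, List.cons.injEq] at hlr
    obtain ⟨rfl, hlr⟩ := hlr
    rcases List.eq_nil_or_concat r with rfl | ⟨r', x, rfl⟩
    · have h2 : (l' ++ ' ' :: w) ++ [' '] = cs ++ [' '] := by
        simpa [List.append_assoc] using hlr
      have h3 : l' ++ ' ' :: w = cs := List.append_cancel_right h2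
      rw [← h3, List.splitOnP_append_cons (fun c : Char => c == ' ') l' w ' ' hsep,
          List.splitOnP_eq_single _ _ hw]
      simp
    · have h2 : (l' ++ ' ' :: (w ++ ' ' :: r')) ++ [x] = cs ++ [' '] := by
        simpa [List.append_assoc] using hlr
      obtain ⟨h3, -⟩ := List.append_inj' h2 rfl
      rw [← h3, List.splitOnP_append_cons (fun c : Char => c == ' ') l' _ ' ' hsep,
          List.splitOnP_first _ _ hw ' ' hsep r']
      simp

-- the padded-marker substring test IS token membership
theorem pv_pad_iff (w cs : List Char) (hw : ∀ c ∈ w, ¬((fun c : Char => c == ' ') c = true)) :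
    PySem.Chars.isIn (' ' :: (w ++ [' '])) (' ' :: (cs ++ [' '])) = true
      ↔ w ∈ cs.splitOn ' ' := by
  rw [PySem.Chars.isIn_iff_infix]
  constructor
  · exact pv_infix_mem_splitOn w cs hw
  · intro hmem
    have h := pv_mem_intercalate_infix w (cs.splitOn ' ') hmem
    rwa [List.intercalate_splitOn] at h

-- ===== VERDICT (by name: the statement is the Claim_ definition above) =====
set_option maxRecDepth 4096 in
theorem looks_like_prose_py_spec : Claim_equal_looks_like_prose_py := by
  intro value _
  show looks_like_prose_py value = looks_like_prose_py_alt value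
  have hsetmem : ∀ t : List Char, pvMarkerWords.contains t = true ↔ t ∈ pvMarkerWordList := by
    intro t
    constructor
    · intro h
      exact (PySem.Set.mem_ofList pvMarkerWordList t).mp
        (by simpa [pvMarkerWords, PySem.Set.contains, List.contains_iff_mem] using h)
    · intro h
      simpa [pvMarkerWords, PySem.Set.contains, List.contains_iff_mem] using
        (PySem.Set.mem_ofList pvMarkerWordList t).mpr h
  have hpadb : pvMarkerWordList.all (fun w => w.all (fun c => c != ' ')) = true := by decide
  have hpad : ∀ w ∈ pvMarkerWordList, ∀ c ∈ w, ¬((fun c : Char => c == ' ') c = true) := by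
    intro w hw c hc
    simpa using (List.all_eq_true.mp ((List.all_eq_true.mp hpadb) w hw)) c hc
  have hmk : ([[' ', 'i', 's', ' '],
     [' ', 'w', 'a', 's', ' '],
     [' ', 'a', 'r', 'e', ' '],
     [' ', 'w', 'e', 'r', 'e', ' '],
     [' ', 'h', 'a', 's', ' '],
     [' ', 'h', 'a', 'v', 'e', ' '],
     [' ', 'w', 'i', 'l', 'l', ' '],
     [' ', 'w', 'o', 'u', 'l', 'd', ' '],
     [' ', 's', 'h', 'o', 'u', 'l', 'd', ' '],
     [' ', 'c', 'a', 'n', ' '],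
     [' ', 'm', 'a', 'y', ' '],
     [' ', 'm', 'i', 'g', 'h', 't', ' '],
     [' ', 'w', 'h', 'i', 'c', 'h', ' '],
     [' ', 't', 'h', 'a', 't', ' '],
     [' ', 'h', 'e', 'l', 'p', ' '],
     [' ', 'h', 'e', 'l', 'p', 's', ' '],
     [' ', 'e', 'x', 'p', 'a', 'n', 'd', ' '],
     [' ', 'c', 'a', 't', 'a', 'l', 'y', 'z', 'e', ' '],
     [' ', 's', 'c', 'a', 'l', 'e', ' '],
     [' ', 'g', 'r', 'o', 'w', ' '],
     [' ', 't', 'h', 'e', 'i', 'r', ' '],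
     [' ', 'i', 't', 's', ' '],
     [' ', 'o', 'n', ' ']] : List (List Char))
      = pvMarkerWordList.map (fun w => ' ' :: (w ++ [' '])) := by rfl
  unfold looks_like_prose_py looks_like_prose_py_alt
  rw [Bool.eq_iff_iff]
  simp only [hmk, PySem.Chars.split?, List.isEmpty_cons, Bool.false_eq_true, if_false,
    Option.getD_some, pv_splitOn_single, List.any_map, List.any_eq_true, Function.comp]
  constructor
  · rintro ⟨w, hwmem, hisin⟩
    exact ⟨w, (pv_pad_iff w _ (hpad w hwmem)).mp hisin, (hsetmem w).mpr hwmem⟩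
  · rintro ⟨t, htok, hc⟩
    have htmem : t ∈ pvMarkerWordList := (hsetmem t).mp hc
    exact ⟨t, htmem, (pv_pad_iff t _ (hpad t htmem)).mpr htok⟩
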